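-- pv_equiv track=rewrite | github.com/15215913937/playwrightDemo | ble_location_recognition/a.py | findN
-- ===== SOURCE A (Python) =====
-- def findN(arr, count, n):
--     index = [0] * n
--     flag = 0
--
--     for i in range(n):
--         for j in range(count):
--             if arr[index[i]] <= arr[j]:
--                 for k in range(i + 1):
--                     if j == index[k]:
--                         flag = 1
--                         break
--                 if not flag:
--                     index[i] = j
--                 else:
--                     flag = 0
--                     continue
--
--     tmp = index[n - 1]
--     return tmp
-- ===== SOURCE B (Python) =====
-- def findN(arr, count, n):
--     for j in range(count):
--         rank = sum(1 for k in range(count) if (arr[k], k) > (arr[j], j))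
--         if rank == n - 1:
--             return j
--     return 0
-- ===== Notes on version B (the rewrite author's own statement) =====
-- stated objective: alternative
-- what changed: Replaces A's triply nested greedy max-rescan with a used-index check and a zero-padded work array by direct rank selection: for each index compute its descending (value, index) rank by counting strictly greater pairs and return the index of rank n-1 (0 if no index has that rank).
-- intended difference: On inputs with 1 <= n <= count <= len(arr) where fewer than n of the first count elements are >= arr[0], A's scan sticks at its sentinel index 0 and returns 0, while B returns the index of the true n-th largest element (ties to the larger index), which is the intended n-th selection. — e.g. on findN([5, 1], 2, 2): A returns 0, B returns 1
import Mathlib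
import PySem

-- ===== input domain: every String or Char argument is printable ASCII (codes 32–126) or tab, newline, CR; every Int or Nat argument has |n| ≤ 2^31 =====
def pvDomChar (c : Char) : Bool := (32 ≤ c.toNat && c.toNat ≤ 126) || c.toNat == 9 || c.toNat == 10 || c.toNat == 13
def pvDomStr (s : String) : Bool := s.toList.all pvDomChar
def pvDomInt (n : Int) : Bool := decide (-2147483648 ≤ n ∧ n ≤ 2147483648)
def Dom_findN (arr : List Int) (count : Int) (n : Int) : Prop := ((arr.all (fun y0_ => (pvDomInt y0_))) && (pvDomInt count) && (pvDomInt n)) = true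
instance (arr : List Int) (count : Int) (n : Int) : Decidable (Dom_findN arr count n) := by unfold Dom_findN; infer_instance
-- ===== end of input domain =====

-- B replaces A's triply nested greedy max-rescan by per-index descending (value, index) rank counting with a rank-(n-1) lookup (objective: alternative).

-- ===== PORT A =====
-- inner `for k in range(i+1): if j == index[k]: flag = 1; break`
def findNKLoop (j : Int) (index : List Int) (flag : Int) : List Int → Int
  | [] => flag
  | k :: ks => if j = PySem.List.pyGetD index k 0 then 1 else findNKLoop j index flag ks

-- body of `for j in range(count)`: state is (index, flag)
def findNJStep (arr : List Int) (i : Int) (st : List Int × Int) (j : Int) : List Int × Int :=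
  if PySem.List.pyGetD arr (PySem.List.pyGetD st.1 i 0) 0 ≤ PySem.List.pyGetD arr j 0 then
    let flag := findNKLoop j st.1 st.2 (PySem.List.pyRange 0 (i + 1) 1)
    if flag = 0 then (PySem.List.pySetD st.1 i j, flag) else (st.1, 0)
  else st

def findN (arr : List Int) (count : Int) (n : Int) : Int :=
  let index : List Int := List.replicate n.toNat 0   -- [0] * n  ([] for n ≤ 0, as in Python)
  let st := (PySem.List.pyRange 0 n 1).foldl
      (fun st i => (PySem.List.pyRange 0 count 1).foldl (findNJStep arr i) st) (index, 0)
  PySem.List.pyGetD st.1 (n - 1) 0                   -- tmp = index[n-1]; return tmp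

-- ===== PORT B =====
-- rank = sum(1 for k in range(count) if (arr[k], k) > (arr[j], j))
def findNRank (arr : List Int) (count : Int) (j : Int) : Nat :=
  (PySem.List.pyRange 0 count 1).countP (fun k =>
    decide (PySem.List.pyGetD arr j 0 < PySem.List.pyGetD arr k 0 ∨
      (PySem.List.pyGetD arr j 0 = PySem.List.pyGetD arr k 0 ∧ j < k)))

-- `for j in range(count): ... if rank == n - 1: return j` then `return 0`
def findN_alt (arr : List Int) (count : Int) (n : Int) : Int :=
  match (PySem.List.pyRange 0 count 1).find?
      (fun j => decide ((findNRank arr count j : Int) = n - 1)) with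
  | some j => j
  | none => 0

-- ===== PRECONDITION & SPEC =====
-- Pre_ excludes exactly the inputs where A raises IndexError: n ≤ 0 (index[n-1] on the empty
-- index list) and 1 ≤ count > len(arr) (arr[j] out of range).
def Pre_findN (arr : List Int) (count : Int) (n : Int) : Prop :=
  1 ≤ n ∧ (count ≤ 0 ∨ count ≤ arr.length)
instance (arr : List Int) (count : Int) (n : Int) : Decidable (Pre_findN arr count n) := by
  unfold Pre_findN; infer_instance
def pvWitness_findN : List Int × Int × Int := ([3, 1, 2], 3, 2)

-- On inputs with 1 ≤ n ≤ count ≤ len(arr) where fewer than n of the first count elements are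
-- ≥ arr[0], A's scan sticks at its sentinel index 0 and returns 0, while B returns the index of
-- the true n-th largest element (ties to the larger index), which is the intended n-th selection.
def D_findN (arr : List Int) (count : Int) (n : Int) : Prop :=
  1 ≤ n ∧ n ≤ count ∧ count ≤ arr.length ∧
    (((arr.take count.toNat).countP (fun v => decide (arr.headD 0 ≤ v)) : Int) < n)
instance (arr : List Int) (count : Int) (n : Int) : Decidable (D_findN arr count n) := by
  unfold D_findN; infer_instance

def Spec_findN (arr : List Int) (count : Int) (n : Int) (out : Int) : Prop :=
  ¬ D_findN arr count n → out = findN_alt arr count n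
instance (arr : List Int) (count : Int) (n : Int) (out : Int) : Decidable (Spec_findN arr count n out) := by
  unfold Spec_findN; infer_instance

def pvDiffWitness_findN : List Int × Int × Int := ([5, 1], 2, 2)
def pvDiffWitnessOut_findN : Int × Int := (0, 1)

-- ===== CLAIM (what is proved, stated in full; the proofs are below) =====
def Claim_unchanged_findN : Prop := ∀ (arr : List Int) (count : Int) (n : Int), Dom_findN arr count n → Pre_findN arr count n → Spec_findN arr count n (findN arr count n)
def Claim_changed_findN : Prop := Dom_findN (pvDiffWitness_findN.1) (pvDiffWitness_findN.2.1) (pvDiffWitness_findN.2.2) ∧ Pre_findN (pvDiffWitness_findN.1) (pvDiffWitness_findN.2.1) (pvDiffWitness_findN.2.2) ∧ D_findN (pvDiffWitness_findN.1) (pvDiffWitness_findN.2.1) (pvDiffWitness_findN.2.2) ∧ findN (pvDiffWitness_findN.1) (pvDiffWitness_findN.2.1) (pvDiffWitness_findN.2.2) = pvDiffWitnessOut_findN.1 ∧ findN_alt (pvDiffWitness_findN.1) (pvDiffWitness_findN.2.1) (pvDiffWitness_findN.2.2) = pvDiffWitnessOut_findN.2 ∧ pvDiffWitnessOut_findN.1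 ≠ pvDiffWitnessOut_findN.2
def Claim_exact_findN : Prop := ∀ (arr : List Int) (count : Int) (n : Int), Dom_findN arr count n → Pre_findN arr count n → D_findN arr count n → findN arr count n ≠ findN_alt arr count n

-- ===== LEMMAS AND PROOFS =====

-- the element value a Python index j denotes, total form
def pvVal (arr : List Int) (x : Int) : Int := PySem.List.pyGetD arr x 0

-- the comparator sorted2 uses for reverse=True on key (arr[j], j): strict descending lex order
def pvBef (arr : List Int) (a b : Int) : Bool :=
  decide (pvVal arr b < pvVal arr a) || (!decide (pvVal arr a < pvVal arr b) && decide (b < a))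

-- non-strict ascending lex order on (arr[j], j)
def pvLexle (arr : List Int) (x y : Int) : Prop :=
  pvVal arr x < pvVal arr y ∨ (pvVal arr x = pvVal arr y ∧ x ≤ y)

-- the descending index order B computes
def pvOrd (arr : List Int) (count : Int) : List Int :=
  PySem.List.sorted2 (PySem.List.pyRange 0 count 1)
    (fun j => PySem.List.pyGetD arr j 0) (fun j => j) true

theorem pvOrd_eq_foldl (arr : List Int) (count : Int) :
    pvOrd arr count = (PySem.List.pyRange 0 count 1).foldl
      (fun acc x => PySem.List.insertBy (pvBef arr) x acc) [] := by
  rfl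

theorem pvBef_total (arr : List Int) (a b : Int) (h : a ≠ b) :
    pvBef arr a b = true ∨ pvBef arr b a = true := by
  simp only [pvBef, Bool.or_eq_true, Bool.and_eq_true, Bool.not_eq_true',
    decide_eq_true_eq, decide_eq_false_iff_not]
  omega

theorem pvBef_trans (arr : List Int) (a b c : Int)
    (h1 : pvBef arr a b = true) (h2 : pvBef arr b c = true) : pvBef arr a c = true := by
  simp only [pvBef, Bool.or_eq_true, Bool.and_eq_true, Bool.not_eq_true',
    decide_eq_true_eq, decide_eq_false_iff_not] at *
  omega

theorem pvBef_lexle (arr : List Int) (a b : Int) (h : pvBef arr a b = true) :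
    pvLexle arr b a := by
  simp only [pvBef, Bool.or_eq_true, Bool.and_eq_true, Bool.not_eq_true',
    decide_eq_true_eq, decide_eq_false_iff_not] at h
  unfold pvLexle
  omega

theorem pvLexle_refl (arr : List Int) (a : Int) : pvLexle arr a a := by
  unfold pvLexle; omega

theorem pvLexle_trans (arr : List Int) (a b c : Int)
    (h1 : pvLexle arr a b) (h2 : pvLexle arr b c) : pvLexle arr a c := by
  unfold pvLexle at *; omega

theorem pvLexle_antisymm (arr : List Int) (a b : Int)
    (h1 : pvLexle arr a b) (h2 : pvLexle arr b a) : a = b := by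
  unfold pvLexle at *; omega

theorem pvInsertBy_pairwise (arr : List Int) (x : Int) (acc : List Int)
    (h : acc.Pairwise (fun a b => pvBef arr a b = true)) (hx : ∀ y ∈ acc, y ≠ x) :
    (PySem.List.insertBy (pvBef arr) x acc).Pairwise (fun a b => pvBef arr a b = true) := by
  induction acc with
  | nil =>
    simp [PySem.List.insertBy]
  | cons y ys ih =>
    rw [List.pairwise_cons] at h
    unfold PySem.List.insertBy
    by_cases hb : pvBef arr x y = true
    · simp only [hb, if_pos]
      refine List.pairwise_cons.mpr ⟨?_, List.pairwise_cons.mpr ⟨h.1, h.2⟩⟩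
      intro z hz
      rcases List.mem_cons.mp hz with rfl | hz'
      · exact hb
      · exact pvBef_trans arr x y z hb (h.1 z hz')
    · rw [if_neg hb]
      refine List.pairwise_cons.mpr ⟨?_, ih h.2 (fun z hz => hx z (List.mem_cons_of_mem _ hz))⟩
      intro z hz
      rcases (PySem.List.mem_insertBy _ _ _ _).mp hz with rfl | hz'
      · rcases pvBef_total arr z y (fun hh => hx y (List.mem_cons_self) hh.symm) with h1 | h1
        · exact absurd h1 hb
        · exact h1
      · exact h.1 z hz'

theorem pvOrd_pairwise (arr : List Int) (count : Int) :
    (pvOrd arr count).Pairwise (fun a b => pvBef arr a b = true) := by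
  rw [pvOrd_eq_foldl]
  have key : ∀ (xs acc : List Int), xs.Nodup →
      acc.Pairwise (fun a b => pvBef arr a b = true) → (∀ y ∈ acc, y ∉ xs) →
      (xs.foldl (fun acc x => PySem.List.insertBy (pvBef arr) x acc) acc).Pairwise
        (fun a b => pvBef arr a b = true) := by
    intro xs
    induction xs with
    | nil => intro acc _ h _; simpa using h
    | cons x t ih =>
      intro acc hnd h hdisj
      simp only [List.foldl_cons]
      have hnd' := List.nodup_cons.mp hnd
      refine ih _ hnd'.2 ?_ ?_
      · exact pvInsertBy_pairwise arr x acc h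
          (fun y hy => fun hxy => hdisj y hy (by simp [hxy]))
      · intro y hy
        rcases (PySem.List.mem_insertBy _ _ _ _).mp hy with rfl | hy'
        · exact hnd'.1
        · intro hmem; exact hdisj y hy' (List.mem_cons_of_mem _ hmem)
  exact key _ [] (PySem.List.nodup_pyRange_one 0 count) (by simp) (by simp)

theorem pvOrd_perm (arr : List Int) (count : Int) :
    (pvOrd arr count).Perm (PySem.List.pyRange 0 count 1) := by
  exact PySem.List.sorted2_perm _ _ _ _

theorem pvOrd_nodup (arr : List Int) (count : Int) : (pvOrd arr count).Nodup :=
  ((pvOrd_perm arr count).nodup_iff).mpr (PySem.List.nodup_pyRange_one 0 count)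

theorem pvOrd_length (arr : List Int) (count : Int) :
    (pvOrd arr count).length = count.toNat := by
  rw [(pvOrd_perm arr count).length_eq, PySem.List.length_pyRange_one]
  simp

theorem pvOrd_mem (arr : List Int) (count : Int) (x : Int) :
    x ∈ pvOrd arr count ↔ 0 ≤ x ∧ x < count := by
  rw [(pvOrd_perm arr count).mem_iff, PySem.List.mem_pyRange_one]

theorem pvOrd_getElem_bef (arr : List Int) (count : Int) (p q : Nat)
    (hpq : p < q) (hq : q < (pvOrd arr count).length) :
    pvBef arr (pvOrd arr count)[p] (pvOrd arr count)[q] = true :=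
  (List.pairwise_iff_getElem.mp (pvOrd_pairwise arr count)) p q
    (lt_trans hpq hq) hq hpq

-- countP characterization along a monotonically-sorted list
theorem pvCountP_pairwise_getElem (l : List Int) (P : Int → Bool)
    (h : l.Pairwise (fun a b => P b = true → P a = true)) :
    ∀ (p : Nat) (hp : p < l.length), (P l[p] = true ↔ p < l.countP P) := by
  induction l with
  | nil => intro p hp; simp at hp
  | cons x t ih =>
    rw [List.pairwise_cons] at h
    intro p hp
    cases p with
    | zero =>
      simp only [List.getElem_cons_zero, List.countP_cons]
      constructor
      · intro hPx
        simp only [hPx, if_pos]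
        omega
      · intro hpos
        by_contra hnx
        have hx0 : (if P x then 1 else 0) = 0 := by simp [hnx]
        rw [hx0] at hpos
        obtain ⟨b, hb, hPb⟩ := List.countP_pos_iff.mp (by omega)
        exact hnx (h.1 b hb hPb)
    | succ q =>
      have hq : q < t.length := by simpa using hp
      have := ih h.2 q hq
      simp only [List.getElem_cons_succ, List.countP_cons]
      by_cases hx : P x = true
      · simp only [hx, if_pos]
        rw [this]
        omega
      · have hall : ∀ b ∈ t, ¬ P b = true := fun b hb hPb => hx (h.1 b hb hPb)
        have ht0 : t.countP P = 0 := List.countP_eq_zero.mpr hall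
        have htq : ¬ P t[q] = true := hall _ (List.getElem_mem hq)
        rw [if_neg hx, ht0]
        simp only [Nat.add_zero]
        rw [ht0] at this
        exact ⟨fun hh => absurd hh htq, fun hh => by omega⟩

-- number of indices j < count with arr[0] <= arr[j]
def pvBc (arr : List Int) (count : Int) : Nat :=
  (PySem.List.pyRange 0 count 1).countP (fun j => decide (pvVal arr 0 ≤ pvVal arr j))

theorem pvBc_le (arr : List Int) (count : Int) : pvBc arr count ≤ count.toNat := by
  unfold pvBc
  have := List.countP_le_length (p := fun j => decide (pvVal arr 0 ≤ pvVal arr j))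
    (l := PySem.List.pyRange 0 count 1)
  rw [PySem.List.length_pyRange_one] at this
  simpa using this

theorem pvOrd_big_iff (arr : List Int) (count : Int) (p : Nat) (hp : p < (pvOrd arr count).length) :
    (pvVal arr 0 ≤ pvVal arr (pvOrd arr count)[p]) ↔ p < pvBc arr count := by
  have hpw : (pvOrd arr count).Pairwise
      (fun a b => (decide (pvVal arr 0 ≤ pvVal arr b)) = true →
                  (decide (pvVal arr 0 ≤ pvVal arr a)) = true) := by
    refine (pvOrd_pairwise arr count).imp ?_
    intro a b hab
    have := pvBef_lexle arr a b hab
    unfold pvLexle at this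
    simp only [decide_eq_true_eq]
    omega
  have hc := pvCountP_pairwise_getElem (pvOrd arr count)
    (fun j => decide (pvVal arr 0 ≤ pvVal arr j)) hpw p hp
  have hperm : (pvOrd arr count).countP (fun j => decide (pvVal arr 0 ≤ pvVal arr j)) =
      pvBc arr count := (pvOrd_perm arr count).countP_eq _
  rw [hperm] at hc
  simpa using hc

-- the index array after the first i outer stages
def pvStage (arr : List Int) (count : Int) (N i : Nat) : List Int :=
  (pvOrd arr count).take (min i (pvBc arr count)) ++
    List.replicate (N - min i (pvBc arr count)) 0

theorem pvKLoop_eq (j : Int) (index : List Int) (ks : List Int) :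
    findNKLoop j index 0 ks = if (∃ k ∈ ks, PySem.List.pyGetD index k 0 = j) then 1 else 0 := by
  induction ks with
  | nil => simp [findNKLoop]
  | cons k t ih =>
    unfold findNKLoop
    by_cases hk : j = PySem.List.pyGetD index k 0
    · simp [hk]
    · rw [if_neg hk, ih]
      have : ¬ PySem.List.pyGetD index k 0 = j := fun h => hk h.symm
      simp [this]

-- setting the middle slot of (l1 ++ c :: l2)
theorem pvSet_mid (l1 l2 : List Int) (c v : Int) :
    (l1 ++ c :: l2).set l1.length v = l1 ++ v :: l2 := by
  induction l1 with
  | nil => rfl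
  | cons a t ih => simp [ih]

-- reading the middle slot of (l1 ++ c :: l2)
theorem pvGetD_mid (l1 l2 : List Int) (c : Int) :
    (l1 ++ c :: l2).getD l1.length 0 = c := by
  rw [List.getD_append_right _ _ _ _ (le_refl _)]
  simp

-- the shape of the stage list during a selection stage
theorem pvStage_sel (arr : List Int) (count : Int) (N i : Nat)
    (hiN : i < N) (hib : i < pvBc arr count) :
    pvStage arr count N i = (pvOrd arr count).take i ++ (0 : Int) :: List.replicate (N - i - 1) 0 := by
  unfold pvStage
  have hmin : min i (pvBc arr count) = i := by omega
  rw [hmin]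
  have h2 : List.replicate (N - i) (0 : Int) = 0 :: List.replicate (N - i - 1) 0 := by
    obtain ⟨k, hk⟩ : ∃ k, N - i = k + 1 := ⟨N - i - 1, by omega⟩
    rw [hk, List.replicate_succ]
    simp
  rw [h2]

theorem pvStage_sel_succ (arr : List Int) (count : Int) (N i : Nat)
    (hiN : i < N) (hib : i < pvBc arr count) :
    pvStage arr count N (i + 1) =
      (pvOrd arr count).take i ++
        (pvOrd arr count).getD i 0 :: List.replicate (N - i - 1) 0 := by
  unfold pvStage
  have hbc : pvBc arr count ≤ (pvOrd arr count).length := by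
    rw [pvOrd_length]; exact pvBc_le arr count
  have hi : i < (pvOrd arr count).length := lt_of_lt_of_le hib hbc
  have hmin : min (i + 1) (pvBc arr count) = i + 1 := by omega
  have hg : (pvOrd arr count).getD i 0 = (pvOrd arr count)[i] := by
    simp [List.getD_eq_getElem?_getD, List.getElem?_eq_getElem hi]
  rw [hmin, hg, List.take_add_one, List.getElem?_eq_getElem hi]
  simp only [Option.toList_some, List.append_assoc, List.singleton_append, Nat.sub_sub]

-- what k-scan of the stage list with cur in slot i blocks
theorem pvMid_blocked (arr : List Int) (i : Nat) (l1 l2 : List Int) (cur j : Int)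
    (hl1 : l1.length = i) :
    (∃ k ∈ PySem.List.pyRange 0 ((i : Int) + 1) 1,
        PySem.List.pyGetD (l1 ++ cur :: l2) k 0 = j) ↔ (j ∈ l1 ∨ j = cur) := by
  constructor
  · rintro ⟨k, hk, hget⟩
    rw [PySem.List.mem_pyRange_one] at hk
    have hk0 : k = ((k.toNat : Nat) : Int) := by omega
    rw [hk0, PySem.List.pyGetD_natCast] at hget
    by_cases hki : k.toNat < i
    · left
      rw [List.getD_append _ _ _ _ (by omega)] at hget
      have hlt : k.toNat < l1.length := by omega
      rw [List.getD_eq_getElem?_getD, List.getElem?_eq_getElem hlt] at hget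
      simp at hget
      rw [← hget]
      exact List.getElem_mem hlt
    · right
      have hki' : k.toNat = i := by omega
      rw [hki', ← hl1, pvGetD_mid] at hget
      omega
  · rintro (hmem | rfl)
    · obtain ⟨p, hp, hgp⟩ := List.mem_iff_getElem.mp hmem
      refine ⟨(p : Int), ?_, ?_⟩
      · rw [PySem.List.mem_pyRange_one]; omega
      · rw [PySem.List.pyGetD_natCast, List.getD_append _ _ _ _ hp,
          List.getD_eq_getElem?_getD, List.getElem?_eq_getElem hp]
        simpa using hgp
    · refine ⟨(i : Int), ?_, ?_⟩
      · rw [PySem.List.mem_pyRange_one]; omega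
      · rw [PySem.List.pyGetD_natCast, ← hl1, pvGetD_mid]

-- selection stage: the inner loop writes ord[i] at slot i
theorem pvSelStage (arr : List Int) (count : Int) (N i : Nat)
    (hlen : count ≤ arr.length) (hiN : i < N) (hib : i < pvBc arr count) :
    (PySem.List.pyRange 0 count 1).foldl (findNJStep arr (i : Int))
      (pvStage arr count N i, 0) = (pvStage arr count N (i + 1), 0) := by
  have hbcm : pvBc arr count ≤ (pvOrd arr count).length := by
    rw [pvOrd_length]; exact pvBc_le arr count
  have hcm : 1 ≤ count := by
    have := pvBc_le arr count; omega
  have hi : i < (pvOrd arr count).length := lt_of_lt_of_le hib hbcm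
  have hL1len : ((pvOrd arr count).take i).length = i := by rw [List.length_take]; omega
  have main : ∀ (jj : Nat), jj ≤ count.toNat →
      ∃ cur : Int,
        (PySem.List.pyRange 0 (jj : Int) 1).foldl (findNJStep arr (i : Int))
            ((pvOrd arr count).take i ++ (0 : Int) :: List.replicate (N - i - 1) 0, 0)
          = ((pvOrd arr count).take i ++ cur :: List.replicate (N - i - 1) 0, 0)
        ∧ (cur = 0 ∨ (1 ≤ cur ∧ cur < (jj : Int) ∧ cur ∉ (pvOrd arr count).take i))
        ∧ (∀ x : Int, (x = 0 ∨ (1 ≤ x ∧ x < (jj : Int) ∧ x ∉ (pvOrd arr count).take i)) →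
            pvLexle arr x cur) := by
    intro jj
    induction jj with
    | zero =>
      intro _
      refine ⟨0, by rw [PySem.List.pyRange_one_eq_nil (by omega)]; rfl, Or.inl rfl, ?_⟩
      rintro x (rfl | ⟨h1, h2, h3⟩)
      · exact pvLexle_refl arr 0
      · exact absurd h2 (by omega)
    | succ m ih =>
      intro hm1
      obtain ⟨cur, hfold, hcand, hmax⟩ := ih (by omega)
      have hcast : ((m + 1 : Nat) : Int) = (m : Int) + 1 := by push_cast; ring
      rw [hcast, PySem.List.pyRange_one_succ_right (by omega), List.foldl_append, hfold,
        List.foldl_cons, List.foldl_nil]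
      have hcurget : PySem.List.pyGetD
          ((pvOrd arr count).take i ++ cur :: List.replicate (N - i - 1) 0) (i : Int) 0 = cur := by
        rw [PySem.List.pyGetD_natCast]
        have hmid := pvGetD_mid ((pvOrd arr count).take i) (List.replicate (N - i - 1) 0) cur
        rw [hL1len] at hmid
        exact hmid
      by_cases hcond : PySem.List.pyGetD arr cur 0 ≤ PySem.List.pyGetD arr (m : Int) 0
      · by_cases hblk : ((m : Int) ∈ (pvOrd arr count).take i ∨ (m : Int) = cur)
        · refine ⟨cur, ?_, ?_, ?_⟩
          · show findNJStep arr (i : Int) _ (m : Int) = _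
            unfold findNJStep
            simp only [hcurget]
            rw [if_pos hcond, pvKLoop_eq,
              if_pos ((pvMid_blocked arr i _ _ cur (m : Int) hL1len).mpr hblk)]
            rw [if_neg (by norm_num)]
          · rcases hcand with h | ⟨h1, h2, h3⟩
            · exact Or.inl h
            · exact Or.inr ⟨h1, by omega, h3⟩
          · rintro x (rfl | ⟨h1, h2, h3⟩)
            · exact hmax 0 (Or.inl rfl)
            · by_cases hxm : x = (m : Int)
              · subst hxm
                rcases hblk with hb | hb
                · exact absurd hb h3
                · rw [hb]; exact pvLexle_refl arr cur
              · exact hmax x (Or.inr ⟨h1, by omega, h3⟩)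
        · push_neg at hblk
          have hm0 : (1 : Int) ≤ (m : Int) := by
            by_contra hm0
            have : m = 0 := by omega
            subst this
            have : cur = 0 := by
              rcases hcand with h | ⟨h1, h2, h3⟩
              · exact h
              · omega
            exact hblk.2 (by simp [this])
          refine ⟨(m : Int), ?_, ?_, ?_⟩
          · show findNJStep arr (i : Int) _ (m : Int) = _
            unfold findNJStep
            simp only [hcurget]
            rw [if_pos hcond, pvKLoop_eq,
              if_neg (fun hex => hblk.elim (fun a b =>
                ((pvMid_blocked arr i _ _ cur (m : Int) hL1len).mp hex).elim a b))]
            rw [if_pos rfl, PySem.List.pySetD_natCast]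
            have hset := pvSet_mid ((pvOrd arr count).take i) (List.replicate (N - i - 1) 0) cur (↑m)
            rw [hL1len] at hset
            rw [hset]
          · exact Or.inr ⟨hm0, by omega, hblk.1⟩
          · rintro x (rfl | ⟨h1, h2, h3⟩)
            · refine pvLexle_trans arr 0 cur (m : Int) (hmax 0 (Or.inl rfl)) ?_
              unfold pvLexle pvVal
              rcases hcand with h | ⟨ha, hb, hc⟩
              · rw [h] at hcond ⊢; omega
              · omega
            · by_cases hxm : x = (m : Int)
              · subst hxm; exact pvLexle_refl arr _
              · refine pvLexle_trans arr x cur (m : Int) (hmax x (Or.inr ⟨h1, by omega, h3⟩)) ?_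
                unfold pvLexle pvVal
                rcases hcand with h | ⟨ha, hb, hc⟩
                · rw [h] at hcond ⊢; omega
                · omega
      · refine ⟨cur, ?_, ?_, ?_⟩
        · show findNJStep arr (i : Int) _ (m : Int) = _
          unfold findNJStep
          simp only [hcurget]
          rw [if_neg hcond]
        · rcases hcand with h | ⟨h1, h2, h3⟩
          · exact Or.inl h
          · exact Or.inr ⟨h1, by omega, h3⟩
        · rintro x (rfl | ⟨h1, h2, h3⟩)
          · exact hmax 0 (Or.inl rfl)
          · by_cases hxm : x = (m : Int)
            · subst hxm
              unfold pvLexle pvVal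
              omega
            · exact hmax x (Or.inr ⟨h1, by omega, h3⟩)
  obtain ⟨cur, hfold, hcand, hmax⟩ := main count.toNat (le_refl _)
  have hcnt : ((count.toNat : Nat) : Int) = count := by omega
  rw [hcnt] at hfold hcand hmax
  have hordmem : (pvOrd arr count)[i] ∈ pvOrd arr count := List.getElem_mem hi
  have hordrange : 0 ≤ (pvOrd arr count)[i] ∧ (pvOrd arr count)[i] < count :=
    (pvOrd_mem arr count _).mp hordmem
  have hnotin : (pvOrd arr count)[i] ∉ (pvOrd arr count).take i := by
    intro hmem
    obtain ⟨p, hp, hgp⟩ := List.mem_iff_getElem.mp hmem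
    rw [List.getElem_take] at hgp
    have : p = i := ((pvOrd_nodup arr count).getElem_inj_iff).mp hgp
    omega
  have hcandord : (pvOrd arr count)[i] = 0 ∨
      (1 ≤ (pvOrd arr count)[i] ∧ (pvOrd arr count)[i] < count ∧
        (pvOrd arr count)[i] ∉ (pvOrd arr count).take i) := by
    by_cases h0 : (pvOrd arr count)[i] = 0
    · exact Or.inl h0
    · exact Or.inr ⟨by omega, hordrange.2, hnotin⟩
  have hle1 : pvLexle arr (pvOrd arr count)[i] cur := hmax _ hcandord
  have hle2 : pvLexle arr cur (pvOrd arr count)[i] := by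
    rcases hcand with h | ⟨h1, h2, h3⟩
    · subst h
      have hbig : pvVal arr 0 ≤ pvVal arr (pvOrd arr count)[i] :=
        (pvOrd_big_iff arr count i hi).mpr hib
      unfold pvLexle
      omega
    · have hcurmem : cur ∈ pvOrd arr count := (pvOrd_mem arr count cur).mpr ⟨by omega, h2⟩
      obtain ⟨p, hp, hgp⟩ := List.mem_iff_getElem.mp hcurmem
      have hpi : i ≤ p := by
        by_contra hpi
        refine h3 (List.mem_iff_getElem.mpr ⟨p, ?_, ?_⟩)
        · rw [List.length_take]; omega
        · rw [List.getElem_take]; exact hgp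
      rcases Nat.eq_or_lt_of_le hpi with rfl | hlt
      · rw [hgp]; exact pvLexle_refl arr _
      · have := pvBef_lexle arr _ _ (pvOrd_getElem_bef arr count i p hlt hp)
        rw [hgp] at this
        exact this
  have hcureq : cur = (pvOrd arr count)[i] := pvLexle_antisymm arr _ _ hle2 hle1
  rw [pvStage_sel arr count N i hiN hib, pvStage_sel_succ arr count N i hiN hib, hfold, hcureq]
  have hg : (pvOrd arr count).getD i 0 = (pvOrd arr count)[i] := by
    simp [List.getD_eq_getElem?_getD, List.getElem?_eq_getElem hi]
  rw [hg]

-- stuck stage: the inner loop leaves the state unchanged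
theorem pvStuckStage (arr : List Int) (count : Int) (N i : Nat)
    (hlen : count ≤ arr.length) (hiN : i < N) (hib : pvBc arr count ≤ i) :
    (PySem.List.pyRange 0 count 1).foldl (findNJStep arr (i : Int))
      (pvStage arr count N i, 0) = (pvStage arr count N (i + 1), 0) := by
  have hbcm : pvBc arr count ≤ (pvOrd arr count).length := by
    rw [pvOrd_length]; exact pvBc_le arr count
  have hstage : pvStage arr count N (i + 1) = pvStage arr count N i := by
    unfold pvStage
    have h : min (i + 1) (pvBc arr count) = min i (pvBc arr count) := by omega
    rw [h]
  rw [hstage]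
  by_cases hc : count ≤ 0
  · rw [PySem.List.pyRange_one_eq_nil (by omega)]
    rfl
  · have hmin : min i (pvBc arr count) = pvBc arr count := by omega
    have hlentake : ((pvOrd arr count).take (pvBc arr count)).length = pvBc arr count := by
      rw [List.length_take]; omega
    have hfix : ∀ x ∈ PySem.List.pyRange 0 count 1,
        findNJStep arr (i : Int) (pvStage arr count N i, 0) x = (pvStage arr count N i, 0) := by
      intro x hx
      rw [PySem.List.mem_pyRange_one] at hx
      have hcur : PySem.List.pyGetD (pvStage arr count N i) (i : Int) 0 = 0 := by
        rw [PySem.List.pyGetD_natCast]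
        unfold pvStage
        rw [hmin, List.getD_append_right _ _ _ _ (by omega)]
        exact List.getD_replicate 0 (by omega)
      unfold findNJStep
      simp only [hcur]
      by_cases hcond : PySem.List.pyGetD arr 0 0 ≤ PySem.List.pyGetD arr x 0
      · rw [if_pos hcond, pvKLoop_eq]
        have hxmem : x ∈ pvOrd arr count := (pvOrd_mem arr count x).mpr ⟨hx.1, hx.2⟩
        obtain ⟨p, hp, hgp⟩ := List.mem_iff_getElem.mp hxmem
        have hPp : pvVal arr 0 ≤ pvVal arr (pvOrd arr count)[p] := by
          rw [hgp]; exact hcond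
        have hpbc : p < pvBc arr count := (pvOrd_big_iff arr count p hp).mp hPp
        have hex : ∃ k ∈ PySem.List.pyRange 0 ((i : Int) + 1) 1,
            PySem.List.pyGetD (pvStage arr count N i) k 0 = x := by
          refine ⟨(p : Int), ?_, ?_⟩
          · rw [PySem.List.mem_pyRange_one]; omega
          · rw [PySem.List.pyGetD_natCast]
            unfold pvStage
            rw [hmin, List.getD_append _ _ _ _ (by omega)]
            rw [List.getD_eq_getElem?_getD, List.getElem?_eq_getElem (by omega : p < ((pvOrd arr count).take (pvBc arr count)).length)]
            rw [List.getElem_take]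
            simpa using hgp
        rw [if_pos hex, if_neg (by norm_num)]
      · rw [if_neg hcond]
    have hgen : ∀ (l : List Int) (s : List Int × Int),
        (∀ x ∈ l, findNJStep arr (i : Int) s x = s) → l.foldl (findNJStep arr (i : Int)) s = s := by
      intro l
      induction l with
      | nil => intro s _; rfl
      | cons a t ihl =>
        intro s hs
        rw [List.foldl_cons, hs a (List.mem_cons_self)]
        exact ihl s (fun x hx => hs x (List.mem_cons_of_mem _ hx))
    exact hgen _ _ hfix

theorem pvOuter (arr : List Int) (count : Int) (N : Nat) (hlen : count ≤ arr.length) :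
    ∀ i : Nat, i ≤ N →
      (PySem.List.pyRange 0 (i : Int) 1).foldl
        (fun st i => (PySem.List.pyRange 0 count 1).foldl (findNJStep arr i) st)
        (List.replicate N 0, 0) = (pvStage arr count N i, 0) := by
  intro i
  induction i with
  | zero =>
    intro _
    have h0 : PySem.List.pyRange 0 ((0 : Nat) : Int) 1 = [] :=
      PySem.List.pyRange_one_eq_nil (by omega)
    rw [h0]
    show (List.replicate N (0 : Int), (0 : Int)) = _
    unfold pvStage
    simp
  | succ m ihm =>
    intro hm
    have hcast : ((m + 1 : Nat) : Int) = (m : Int) + 1 := by push_cast; ring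
    rw [hcast, PySem.List.pyRange_one_succ_right (by omega), List.foldl_append,
      ihm (by omega), List.foldl_cons, List.foldl_nil]
    by_cases hmb : m < pvBc arr count
    · exact pvSelStage arr count N m hlen (by omega) hmb
    · exact pvStuckStage arr count N m hlen (by omega) (by omega)

-- A's value in closed form (main case)
theorem pvA_closed (arr : List Int) (count : Int) (n : Int)
    (hn : 1 ≤ n) (hc : 1 ≤ count) (hlen : count ≤ arr.length) :
    findN arr count n =
      if n.toNat ≤ pvBc arr count then
        (pvOrd arr count).getD (n.toNat - 1) 0
      else 0 := by
  have hN1 : 1 ≤ n.toNat := by omega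
  have hncast : ((n.toNat : Nat) : Int) = n := by omega
  show PySem.List.pyGetD
      ((PySem.List.pyRange 0 n 1).foldl
        (fun st i => (PySem.List.pyRange 0 count 1).foldl (findNJStep arr i) st)
        (List.replicate n.toNat 0, 0)).1 (n - 1) 0 = _
  conv_lhs => rw [show PySem.List.pyRange 0 n 1
    = PySem.List.pyRange 0 ((n.toNat : Nat) : Int) 1 by rw [hncast]]
  rw [pvOuter arr count n.toNat hlen n.toNat (le_refl _)]
  have hbcm : pvBc arr count ≤ (pvOrd arr count).length := by
    rw [pvOrd_length]; exact pvBc_le arr count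
  have hsub : n - 1 = (((n.toNat - 1 : Nat) : Nat) : Int) := by omega
  rw [hsub, PySem.List.pyGetD_natCast]
  show (pvStage arr count n.toNat n.toNat).getD (n.toNat - 1) 0 = _
  unfold pvStage
  by_cases hle : n.toNat ≤ pvBc arr count
  · rw [if_pos hle]
    have hmin : min n.toNat (pvBc arr count) = n.toNat := by omega
    rw [hmin]
    have hlt : n.toNat - 1 < ((pvOrd arr count).take n.toNat).length := by
      rw [List.length_take]; omega
    rw [List.getD_append _ _ _ _ hlt, List.getD_eq_getElem?_getD,
      List.getElem?_eq_getElem hlt, List.getElem_take]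
    simp [List.getD_eq_getElem?_getD, List.getElem?_eq_getElem (show n.toNat - 1 < (pvOrd arr count).length by omega)]
  · rw [if_neg hle]
    have hmin : min n.toNat (pvBc arr count) = pvBc arr count := by omega
    rw [hmin, List.getD_append_right _ _ _ _ (by rw [List.length_take]; omega)]
    have hlen2 : ((pvOrd arr count).take (pvBc arr count)).length = pvBc arr count := by
      rw [List.length_take]; omega
    rw [hlen2]
    exact List.getD_replicate 0 (by omega)

theorem pvBef_irrefl (arr : List Int) (a : Int) : pvBef arr a a = false := by
  rcases Bool.eq_false_or_eq_true (pvBef arr a a) with h | h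
  · exfalso
    simp only [pvBef, Bool.or_eq_true, Bool.and_eq_true, Bool.not_eq_true',
      decide_eq_true_eq, decide_eq_false_iff_not] at h
    omega
  · exact h

theorem pvBef_asymm (arr : List Int) (a b : Int) (h : pvBef arr a b = true) :
    pvBef arr b a = false := by
  rcases Bool.eq_false_or_eq_true (pvBef arr b a) with h2 | h2
  · exfalso
    simp only [pvBef, Bool.or_eq_true, Bool.and_eq_true, Bool.not_eq_true',
      decide_eq_true_eq, decide_eq_false_iff_not] at h h2
    omega
  · exact h2

-- B's rank of j = how many indices of the range come before j in the pvBef order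
theorem pvRank_eq (arr : List Int) (count : Int) (j : Int) :
    findNRank arr count j = (PySem.List.pyRange 0 count 1).countP (fun k => pvBef arr k j) := by
  refine List.countP_congr ?_
  intro k _
  rw [Bool.eq_iff_iff]
  simp only [pvBef, pvVal, decide_eq_true_eq, Bool.or_eq_true, Bool.and_eq_true,
    Bool.not_eq_true', decide_eq_false_iff_not]
  simp only [iff_true]
  omega

-- the p-th element of the descending order has rank p
theorem pvRank_ord (arr : List Int) (count : Int) (p : Nat)
    (hp : p < (pvOrd arr count).length) :
    findNRank arr count (pvOrd arr count)[p] = p := by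
  obtain ⟨a, ha⟩ : ∃ a, a = (pvOrd arr count)[p] := ⟨_, rfl⟩
  rw [← ha, pvRank_eq, ← (pvOrd_perm arr count).countP_eq]
  conv_lhs => rw [← List.take_append_drop p (pvOrd arr count)]
  rw [List.countP_append]
  have htake : (((pvOrd arr count).take p).countP fun k => pvBef arr k a) = p := by
    rw [List.countP_eq_length.mpr ?_, List.length_take]
    · omega
    · intro x hx
      obtain ⟨q, hq, hgq⟩ := List.mem_iff_getElem.mp hx
      rw [List.length_take] at hq
      rw [List.getElem_take] at hgq
      rw [← hgq, ha]
      exact pvOrd_getElem_bef arr count q p (by omega) hp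
  have hdrop : (((pvOrd arr count).drop p).countP fun k => pvBef arr k a) = 0 := by
    refine List.countP_eq_zero.mpr ?_
    intro x hx
    obtain ⟨q, hq, hgq⟩ := List.mem_iff_getElem.mp hx
    rw [List.length_drop] at hq
    rw [List.getElem_drop] at hgq
    rcases Nat.eq_zero_or_pos q with rfl | hqpos
    · have hgq' : (pvOrd arr count)[p] = x := by simpa using hgq
      rw [ha, ← hgq']
      simp [pvBef_irrefl]
    · have hbef := pvOrd_getElem_bef arr count p (p + q) (by omega) (by omega)
      rw [hgq] at hbef
      rw [ha]
      simp [pvBef_asymm arr _ _ hbef]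
  rw [htake, hdrop]
  omega

-- find? of a predicate holding exactly at one listed element returns that element
theorem pvFind?_unique (l : List Int) (p : Int → Bool) (a : Int)
    (ha : a ∈ l) (hiff : ∀ x ∈ l, (p x = true ↔ x = a)) : l.find? p = some a := by
  induction l with
  | nil => simp at ha
  | cons y t ih =>
    by_cases hy : y = a
    · subst hy
      rw [List.find?_cons_of_pos ((hiff y (List.mem_cons_self)).mpr rfl)]
    · have hny : p y = false := by
        rcases Bool.eq_false_or_eq_true (p y) with h | h
        · exact absurd ((hiff y (List.mem_cons_self)).mp h) hy
        · exact h
      rw [List.find?_cons_of_neg (by simp [hny])]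
      refine ih ?_ (fun x hx => hiff x (List.mem_cons_of_mem _ hx))
      rcases List.mem_cons.mp ha with h | h
      · exact absurd h.symm hy
      · exact h

-- B's value in closed form (main case 1 ≤ n ≤ count)
theorem pvB_closed (arr : List Int) (count : Int) (n : Int)
    (hn : 1 ≤ n) (hnc : n ≤ count) :
    findN_alt arr count n = (pvOrd arr count).getD (n.toNat - 1) 0 := by
  have hlen : (pvOrd arr count).length = count.toNat := pvOrd_length arr count
  have hp : n.toNat - 1 < (pvOrd arr count).length := by omega
  have hmem : (pvOrd arr count)[n.toNat - 1] ∈ PySem.List.pyRange 0 count 1 :=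
    (pvOrd_perm arr count).mem_iff.mp (List.getElem_mem hp)
  have hfind : (PySem.List.pyRange 0 count 1).find?
      (fun j => decide ((findNRank arr count j : Int) = n - 1)) =
      some (pvOrd arr count)[n.toNat - 1] := by
    refine pvFind?_unique _ _ _ hmem ?_
    intro x hx
    obtain ⟨q, hq, hgq⟩ := List.mem_iff_getElem.mp ((pvOrd_perm arr count).mem_iff.mpr hx)
    rw [← hgq]
    simp only [decide_eq_true_eq, pvRank_ord arr count q hq]
    constructor
    · intro hqe
      have : q = n.toNat - 1 := by omega
      subst this; rfl
    · intro he
      have : q = n.toNat - 1 := ((pvOrd_nodup arr count).getElem_inj_iff).mp he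
      omega
  show (match (PySem.List.pyRange 0 count 1).find?
      (fun j => decide ((findNRank arr count j : Int) = n - 1)) with
    | some j => j | none => 0) = _
  rw [hfind]
  simp [List.getD_eq_getElem?_getD, List.getElem?_eq_getElem hp]

-- B's value when n exceeds count: no index attains rank n-1
theorem pvB_zero (arr : List Int) (count : Int) (n : Int) (hnc : count < n) :
    findN_alt arr count n = 0 := by
  have hfind : (PySem.List.pyRange 0 count 1).find?
      (fun j => decide ((findNRank arr count j : Int) = n - 1)) = none := by
    rw [List.find?_eq_none]
    intro x hx
    obtain ⟨q, hq, hgq⟩ := List.mem_iff_getElem.mp ((pvOrd_perm arr count).mem_iff.mpr hx)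
    rw [← hgq]
    simp only [decide_eq_true_eq, pvRank_ord arr count q hq]
    rw [pvOrd_length arr count] at hq
    omega
  show (match (PySem.List.pyRange 0 count 1).find?
      (fun j => decide ((findNRank arr count j : Int) = n - 1)) with
    | some j => j | none => 0) = _
  rw [hfind]

-- A's value when count ≤ 0: the j-loop body never runs, index stays all zero
theorem pvA_trivial (arr : List Int) (count : Int) (n : Int)
    (hn : 1 ≤ n) (hc : count ≤ 0) :
    findN arr count n = 0 := by
  show PySem.List.pyGetD
      ((PySem.List.pyRange 0 n 1).foldl
        (fun st i => (PySem.List.pyRange 0 count 1).foldl (findNJStep arr i) st)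
        (List.replicate n.toNat 0, 0)).1 (n - 1) 0 = 0
  have hgen : ∀ (l : List Int) (s : List Int × Int),
      l.foldl (fun st i => List.foldl (findNJStep arr i) st []) s = s := by
    intro l
    induction l with
    | nil => intro s; rfl
    | cons a t ihl => intro s; rw [List.foldl_cons]; exact ihl _
  rw [PySem.List.pyRange_one_eq_nil (by omega : count ≤ 0), hgen]
  have hsub : n - 1 = (((n.toNat - 1 : Nat) : Nat) : Int) := by omega
  rw [hsub, PySem.List.pyGetD_natCast]
  exact List.getD_replicate 0 (by omega)

theorem pvBc_eq_countP_take (arr : List Int) (count : Int)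
    (hc : 1 ≤ count) (hlen : count ≤ arr.length) :
    (pvBc arr count : Int) = ((arr.take count.toNat).countP (fun v => decide (arr.headD 0 ≤ v)) : Int) := by
  have hmap : (PySem.List.pyRange 0 count 1).map (fun j => PySem.List.pyGetD arr j 0)
      = arr.take count.toNat := by
    apply List.ext_getElem
    · rw [List.length_map, PySem.List.length_pyRange_one, List.length_take]
      omega
    · intro p h1 h2
      rw [List.getElem_map, PySem.List.getElem_pyRange_one, List.getElem_take]
      have hp : p < count.toNat := by
        rw [List.length_map, PySem.List.length_pyRange_one] at h1
        omega
      have : (0 : Int) + (p : Int) = ((p : Nat) : Int) := by omega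
      rw [this, PySem.List.pyGetD_natCast, List.getD_eq_getElem?_getD,
        List.getElem?_eq_getElem (by omega : p < arr.length)]
      rfl
  have hhead : arr.headD 0 = pvVal arr 0 := by
    cases arr with
    | nil => simp at hlen; omega
    | cons a t => simp [pvVal]
  unfold pvBc
  rw [← hmap, List.countP_map]
  refine congrArg Nat.cast (List.countP_congr ?_)
  intro j hj
  rw [hhead]
  rfl

-- ===== VERDICT (by name: the statement is the Claim_ definition above) =====
theorem findN_spec : Claim_unchanged_findN := by
  intro arr count n hdom hpre hnd
  obtain ⟨hn, hpre2⟩ := hpre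
  by_cases hc : count ≤ 0
  · rw [pvA_trivial arr count n hn hc, pvB_zero arr count n (by omega)]
  · have hc1 : 1 ≤ count := by omega
    have hlen : count ≤ arr.length := by
      rcases hpre2 with h | h
      · omega
      · exact h
    rw [pvA_closed arr count n hn hc1 hlen]
    unfold D_findN at hnd
    push_neg at hnd
    have hbc := pvBc_eq_countP_take arr count hc1 hlen
    by_cases hnc : n ≤ count
    · have hbig : (n : Int) ≤ ((arr.take count.toNat).countP (fun v => decide (arr.headD 0 ≤ v)) : Int) := by
        have := hnd hn hnc hlen
        omega
      have hle : n.toNat ≤ pvBc arr count := by omega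
      rw [if_pos hle, pvB_closed arr count n hn hnc]
    · have hgt : ¬ n.toNat ≤ pvBc arr count := by
        have := pvBc_le arr count
        omega
      rw [if_neg hgt, pvB_zero arr count n (by omega)]

theorem findN_changed : Claim_changed_findN := by
  unfold Claim_changed_findN; decide

theorem findN_tight : Claim_exact_findN := by
  intro arr count n hdom hpre hd
  obtain ⟨hn, hnc, hlen, hcnt⟩ := hd
  have hc1 : 1 ≤ count := by omega
  have hbc := pvBc_eq_countP_take arr count hc1 hlen
  have hbcn : pvBc arr count < n.toNat := by omega
  have hNm : n.toNat - 1 < (pvOrd arr count).length := by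
    rw [pvOrd_length]; omega
  rw [pvA_closed arr count n hn hc1 hlen, pvB_closed arr count n hn hnc,
    if_neg (by omega)]
  have hgd : (pvOrd arr count).getD (n.toNat - 1) 0 = (pvOrd arr count)[n.toNat - 1] := by
    simp [List.getD_eq_getElem?_getD, List.getElem?_eq_getElem hNm]
  rw [hgd]
  intro heq
  have hne : (pvOrd arr count)[n.toNat - 1] ≠ 0 := by
    intro h0
    have : pvVal arr 0 ≤ pvVal arr (pvOrd arr count)[n.toNat - 1] := by
      rw [h0]
    have hlt := (pvOrd_big_iff arr count (n.toNat - 1) hNm).mp this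
    omega
  exact hne heq.symm
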